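-- pv_equiv track=rewrite | github.com/therealsahil19/webspace | tests/test_coverage_analysis.py | _categorize_coverage
-- ===== SOURCE A (Python) =====
-- def _categorize_coverage(modules):
--     """Categorize modules by coverage level."""
--     categories = {
--         'excellent': [],  # >90%
--         'good': [],       # 80-90%
--         'fair': [],       # 60-80%
--         'poor': []        # <60%
--     }
--
--     for module, data in modules.items():
--         coverage = data['coverage']
--         if coverage >= 90:
--             categories['excellent'].append(module)
--         elif coverage >= 80:
--             categories['good'].append(module)
--         elif coverage >= 60:
--             categories['fair'].append(module)
--         else:
--             categories['poor'].append(module)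
--
--     return categories
-- ===== SOURCE B (Python) =====
-- def _categorize_coverage(modules):
--     """Categorize modules by coverage level: four staged filter passes, one per band."""
--     items = list(modules.items())
--
--     def select(test):
--         return [m for m, d in items if test(d['coverage'])]
--
--     return {
--         'excellent': select(lambda c: c >= 90),
--         'good':      select(lambda c: 80 <= c < 90),
--         'fair':      select(lambda c: 60 <= c < 80),
--         'poor':      select(lambda c: c < 60),
--     }
-- ===== Notes on version B (the rewrite author's own statement) =====
-- stated objective: alternative
-- what changed: Replaces A's single pass that mutates a four-bucket accumulator with four independent filter passes, one per disjoint coverage band, assembled directly into the result dict.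
import Mathlib
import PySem

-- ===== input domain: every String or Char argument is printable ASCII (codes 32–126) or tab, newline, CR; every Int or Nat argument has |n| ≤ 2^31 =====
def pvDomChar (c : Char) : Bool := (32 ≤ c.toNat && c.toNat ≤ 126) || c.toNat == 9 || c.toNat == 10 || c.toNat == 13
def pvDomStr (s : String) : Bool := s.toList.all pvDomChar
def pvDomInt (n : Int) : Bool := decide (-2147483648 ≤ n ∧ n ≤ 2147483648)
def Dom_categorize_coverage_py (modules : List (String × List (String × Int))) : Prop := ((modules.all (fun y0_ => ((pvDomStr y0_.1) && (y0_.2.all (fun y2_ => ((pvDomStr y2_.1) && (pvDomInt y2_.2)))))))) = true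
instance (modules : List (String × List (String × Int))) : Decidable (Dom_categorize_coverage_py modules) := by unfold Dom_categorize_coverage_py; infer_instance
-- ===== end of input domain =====

-- B replaces A's single mutating-accumulator pass with four independent filter passes,
-- one per disjoint coverage band (objective: alternative, same cost); equivalence is about the returned dict.

-- ===== PORT A =====
-- loop body of A's 'for module, data in modules.items()' (None case = KeyError, excluded by Pre_)
def pvStepA (categories : PySem.Dict String (List String)) (p : String × List (String × Int)) : PySem.Dict String (List String) :=
  match PySem.Dict.get? (PySem.Dict.mk p.2) "coverage" with
  | none => categories
  | some coverage =>
    if coverage ≥ 90 then categories.modify "excellent" [] (fun l => l ++ [p.1])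
    else if coverage ≥ 80 then categories.modify "good" [] (fun l => l ++ [p.1])
    else if coverage ≥ 60 then categories.modify "fair" [] (fun l => l ++ [p.1])
    else categories.modify "poor" [] (fun l => l ++ [p.1])

def categorize_coverage_py (modules : List (String × List (String × Int))) : List (String × List String) :=
  let categories : PySem.Dict String (List String) :=
    PySem.Dict.mk [("excellent", []), ("good", []), ("fair", []), ("poor", [])]
  (modules.foldl pvStepA categories).items

-- ===== PORT B =====
-- B's helper 'select(test)': one filter pass over items, keeping module names whose coverage passes 'test'
-- (the 'none' case of the missing key is outside Pre_; the filter just drops it)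
def pvSelect (test : Int → Bool) (items : List (String × List (String × Int))) : List String :=
  (items.filter (fun p =>
    match PySem.Dict.get? (PySem.Dict.mk p.2) "coverage" with
    | some c => test c
    | none => false)).map Prod.fst

def categorize_coverage_py_alt (modules : List (String × List (String × Int))) : List (String × List String) :=
  [("excellent", pvSelect (fun c => c ≥ 90) modules),
   ("good",      pvSelect (fun c => 80 ≤ c && c < 90) modules),
   ("fair",      pvSelect (fun c => 60 ≤ c && c < 80) modules),
   ("poor",      pvSelect (fun c => c < 60) modules)]

-- ===== PRECONDITION & SPEC =====
-- Pre_ excludes inner dicts missing the key 'coverage' (Python raises KeyError there) and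
-- association lists with duplicate dict keys, on which the Python dicts collapse duplicates
-- so no list-level port can be faithful (a defensible-corner artefact of the dict encoding).
def Pre_categorize_coverage_py (modules : List (String × List (String × Int))) : Prop :=
  (modules.map Prod.fst).Nodup ∧
  ∀ p ∈ modules, (p.2.map Prod.fst).Nodup ∧ "coverage" ∈ p.2.map Prod.fst
instance (modules : List (String × List (String × Int))) : Decidable (Pre_categorize_coverage_py modules) := by unfold Pre_categorize_coverage_py; infer_instance

def pvWitness_categorize_coverage_py : (List (String × List (String × Int))) :=
  [("app.main", [("coverage", 95)]), ("app.util", [("coverage", 61), ("lines", 10)]), ("app.cli", [("coverage", 59)])]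

def Spec_categorize_coverage_py (modules : List (String × List (String × Int))) (out : List (String × List String)) : Prop := out = categorize_coverage_py_alt modules
instance (modules : List (String × List (String × Int))) (out : List (String × List String)) : Decidable (Spec_categorize_coverage_py modules out) := by unfold Spec_categorize_coverage_py; infer_instance

-- ===== CLAIM (what is proved, stated in full; the proofs are below) =====
def Claim_equal_categorize_coverage_py : Prop := ∀ (modules : List (String × List (String × Int))), Dom_categorize_coverage_py modules → Pre_categorize_coverage_py modules → Spec_categorize_coverage_py modules (categorize_coverage_py modules)

-- ===== LEMMAS AND PROOFS =====

-- A's loop, started from any 4-bucket state, ends with each bucket extended by the matching band filter.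
lemma pvFoldA (ms : List (String × List (String × Int))) :
    ∀ e g f p : List String,
    (ms.foldl pvStepA (PySem.Dict.mk [("excellent", e), ("good", g), ("fair", f), ("poor", p)])).items
      = [("excellent", e ++ pvSelect (fun c => c ≥ 90) ms),
         ("good",      g ++ pvSelect (fun c => 80 ≤ c && c < 90) ms),
         ("fair",      f ++ pvSelect (fun c => 60 ≤ c && c < 80) ms),
         ("poor",      p ++ pvSelect (fun c => c < 60) ms)] := by
  induction ms with
  | nil =>
    intro e g f p
    simp [pvSelect]
  | cons hd tl ih =>
    intro e g f p
    simp only [List.foldl_cons]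
    rcases h : PySem.Dict.get? (PySem.Dict.mk hd.2) "coverage" with _ | c
    · rw [show pvStepA (PySem.Dict.mk [("excellent", e), ("good", g), ("fair", f), ("poor", p)]) hd
            = PySem.Dict.mk [("excellent", e), ("good", g), ("fair", f), ("poor", p)] by simp [pvStepA, h]]
      rw [ih e g f p]
      simp [pvSelect, h]
    · by_cases h90 : c ≥ 90
      · rw [show pvStepA (PySem.Dict.mk [("excellent", e), ("good", g), ("fair", f), ("poor", p)]) hd
              = PySem.Dict.mk [("excellent", e ++ [hd.1]), ("good", g), ("fair", f), ("poor", p)] by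
            simp [pvStepA, h, h90, PySem.Dict.modify, PySem.Dict.contains, PySem.Dict.insert,
                  PySem.Dict.getD_eq_get?_getD, PySem.Dict.get?_mk_cons]]
        rw [ih (e ++ [hd.1]) g f p]
        simp [pvSelect, h, h90, show ¬ c < 90 by omega, show ¬ c < 80 by omega, show ¬ c < 60 by omega]
      · by_cases h80 : c ≥ 80
        · rw [show pvStepA (PySem.Dict.mk [("excellent", e), ("good", g), ("fair", f), ("poor", p)]) hd
                = PySem.Dict.mk [("excellent", e), ("good", g ++ [hd.1]), ("fair", f), ("poor", p)] by
              simp [pvStepA, h, h90, h80, PySem.Dict.modify, PySem.Dict.contains, PySem.Dict.insert,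
                    PySem.Dict.getD_eq_get?_getD, PySem.Dict.get?_mk_cons]]
          rw [ih e (g ++ [hd.1]) f p]
          simp [pvSelect, h, h90, h80, show c < 90 by omega, show ¬ c < 80 by omega, show ¬ c < 60 by omega]
        · by_cases h60 : c ≥ 60
          · rw [show pvStepA (PySem.Dict.mk [("excellent", e), ("good", g), ("fair", f), ("poor", p)]) hd
                  = PySem.Dict.mk [("excellent", e), ("good", g), ("fair", f ++ [hd.1]), ("poor", p)] by
                simp [pvStepA, h, h90, h80, h60, PySem.Dict.modify, PySem.Dict.contains, PySem.Dict.insert,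
                      PySem.Dict.getD_eq_get?_getD, PySem.Dict.get?_mk_cons]]
            rw [ih e g (f ++ [hd.1]) p]
            simp [pvSelect, h, h90, h80, h60, show c < 80 by omega, show ¬ c < 60 by omega]
          · rw [show pvStepA (PySem.Dict.mk [("excellent", e), ("good", g), ("fair", f), ("poor", p)]) hd
                  = PySem.Dict.mk [("excellent", e), ("good", g), ("fair", f), ("poor", p ++ [hd.1])] by
                simp [pvStepA, h, h90, h80, h60, PySem.Dict.modify, PySem.Dict.contains, PySem.Dict.insert,
                      PySem.Dict.getD_eq_get?_getD, PySem.Dict.get?_mk_cons]]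
            rw [ih e g f (p ++ [hd.1])]
            simp [pvSelect, h, h90, h80, h60, show c < 60 by omega]

-- ===== VERDICT (by name: the statement is the Claim_ definition above) =====
theorem categorize_coverage_py_spec : Claim_equal_categorize_coverage_py := by
  intro modules _ _
  unfold Spec_categorize_coverage_py categorize_coverage_py categorize_coverage_py_alt
  simpa using pvFoldA modules [] [] [] []
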